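-- pv_equiv track=rewrite | github.com/dzungcamlang/TextClassificationTest | src/job/test.py | find_min_path_length
-- ===== SOURCE A (Python) =====
-- def find_min_path_length(graph, node1, node2):
--     nodes2check = graph.get(node1)
--     checked_node_set = set()
--     if nodes2check == None: return -1#如果返回-1，表示不存在路径
--     distance = 0
--     while len(nodes2check ) > 0:
--         distance += 1
--         if node2 in  nodes2check:
--             return distance
--         else:
--             checked_node_set = checked_node_set | nodes2check
--             temp_nodes2check  = set()  # 如果已经置空，怎么for
--             for a_node in nodes2check:
--                 temp_nodes2check  = temp_nodes2check  | graph.get(a_node , set())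
--             nodes2check = temp_nodes2check  - checked_node_set
--     return -1
-- ===== SOURCE B (Python) =====
-- def find_min_path_length(graph, node1, node2):
--     start = graph.get(node1)
--     if start is None:
--         return -1
--     visited = set(start)
--     queue = [(n, 1) for n in start]
--     i = 0
--     while i < len(queue):
--         node, dist = queue[i]
--         i += 1
--         if node == node2:
--             return dist
--         for nb in graph.get(node, ()):
--             if nb not in visited:
--                 visited.add(nb)
--                 queue.append((nb, dist + 1))
--     return -1
-- ===== Notes on version B (the rewrite author's own statement) =====
-- stated objective: alternative
-- what changed: Replaces A's level-by-level BFS that rebuilds whole frontier/visited sets with set-union and set-difference copies each round by a queue-based BFS with one incrementally updated visited set and per-node distance tags.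
import Mathlib
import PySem

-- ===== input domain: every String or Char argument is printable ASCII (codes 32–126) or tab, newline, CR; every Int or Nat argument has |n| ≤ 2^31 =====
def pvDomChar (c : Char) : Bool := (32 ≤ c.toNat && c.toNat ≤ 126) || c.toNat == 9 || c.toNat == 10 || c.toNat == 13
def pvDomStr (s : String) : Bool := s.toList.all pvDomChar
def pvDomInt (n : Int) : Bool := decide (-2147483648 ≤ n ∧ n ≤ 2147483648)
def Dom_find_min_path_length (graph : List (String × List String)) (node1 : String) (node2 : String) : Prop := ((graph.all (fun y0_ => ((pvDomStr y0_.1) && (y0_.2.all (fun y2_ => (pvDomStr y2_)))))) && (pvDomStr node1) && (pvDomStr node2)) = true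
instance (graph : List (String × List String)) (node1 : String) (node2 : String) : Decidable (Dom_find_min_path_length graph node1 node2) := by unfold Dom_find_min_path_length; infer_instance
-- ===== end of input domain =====

-- B replaces A's level-by-level BFS with repeated whole-set unions/differences by a queue-based
-- BFS with one incrementally-updated visited set (objective: alternative algorithm, same result).

-- ===== PORT A =====
-- helpers the ports cite for their termination measures / invariant arguments
def pvUniverse (graph : List (String × List String)) : List String :=
  graph.flatMap (fun kv => kv.2)

lemma pvGet?_subset_universe (graph : List (String × List String)) (a : String) (v : List String)
    (h : (PySem.Dict.mk graph).get? a = some v) : ∀ x ∈ v, x ∈ pvUniverse graph := by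
  induction graph with
  | nil => simp [PySem.Dict.get?] at h
  | cons kv rest ih =>
    rw [PySem.Dict.get?_mk_cons] at h
    by_cases hk : kv.1 == a
    · simp [hk] at h
      intro x hx
      simp [pvUniverse, List.flatMap_cons]
      exact Or.inl (h ▸ hx)
    · simp [hk] at h
      intro x hx
      simp [pvUniverse, List.flatMap_cons]
      exact Or.inr ((by simpa [pvUniverse] using ih h x hx))

lemma pvGetD_subset_universe (graph : List (String × List String)) (a : String) :
    ∀ x ∈ (PySem.Dict.mk graph).getD a [], x ∈ pvUniverse graph := by
  rw [PySem.Dict.getD_eq_get?_getD]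
  cases h : (PySem.Dict.mk graph).get? a with
  | none => simp
  | some v => simpa using pvGet?_subset_universe graph a v h

lemma pvFilterLe {α : Type} (p q : α → Bool) (himp : ∀ y, q y = true → p y = true) :
    ∀ (U : List α), (U.filter q).length ≤ (U.filter p).length := by
  intro U
  induction U with
  | nil => simp
  | cons a U ih =>
    by_cases hq : q a = true
    · rw [List.filter_cons_of_pos hq, List.filter_cons_of_pos (himp a hq)]
      exact Nat.succ_le_succ ih
    · rw [List.filter_cons_of_neg (by simpa using hq)]
      by_cases hp : p a = true
      · rw [List.filter_cons_of_pos hp]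
        exact Nat.le_succ_of_le ih
      · rw [List.filter_cons_of_neg (by simpa using hp)]
        exact ih

lemma pvFilterMono {α : Type} (p q : α → Bool) (himp : ∀ y, q y = true → p y = true)
    (U : List α) (x : α) (hxU : x ∈ U) (hpx : p x = true) (hqx : q x = false) :
    (U.filter q).length < (U.filter p).length := by
  induction U with
  | nil => cases hxU
  | cons a U ih =>
    rcases List.mem_cons.mp hxU with rfl | hxU'
    · rw [List.filter_cons_of_pos hpx, List.filter_cons_of_neg (by simp [hqx])]
      exact Nat.lt_succ_of_le (pvFilterLe p q himp U)
    · by_cases hq : q a = true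
      · rw [List.filter_cons_of_pos hq, List.filter_cons_of_pos (himp a hq)]
        exact Nat.succ_lt_succ (ih hxU')
      · rw [List.filter_cons_of_neg (by simpa using hq)]
        by_cases hp : p a = true
        · rw [List.filter_cons_of_pos hp]
          exact Nat.lt_succ_of_lt (ih hxU')
        · rw [List.filter_cons_of_neg (by simpa using hp)]
          exact ih hxU'

lemma pvMemUnionFold (graph : List (String × List String)) (xs : List String) (s : List String) (x : String) :
    x ∈ xs.foldl (fun acc a => PySem.Set.union acc ((PySem.Dict.mk graph).getD a [])) s
      ↔ x ∈ s ∨ ∃ a ∈ xs, x ∈ (PySem.Dict.mk graph).getD a [] := by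
  induction xs generalizing s with
  | nil => simp
  | cons a xs ih =>
    simp only [List.foldl_cons, ih, PySem.Set.mem_union, List.mem_cons]
    constructor
    · rintro (⟨h | h⟩ | ⟨b, hb, hx⟩)
      · exact Or.inl h
      · exact Or.inr ⟨a, Or.inl rfl, h⟩
      · exact Or.inr ⟨b, Or.inr hb, hx⟩
    · rintro (h | ⟨b, (rfl | hb), hx⟩)
      · exact Or.inl (Or.inl h)
      · exact Or.inl (Or.inr hx)
      · exact Or.inr ⟨b, hb, hx⟩

-- literal transliteration of A's while-loop (level sets, whole-set union and difference each round);
-- hf is termination apparatus only (frontier ⊆ universe, disjoint from checked)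
def find_min_path_length_loop (graph : List (String × List String)) (node2 : String)
    (nodes2check checked : List String) (distance : Int)
    (hf : ∀ x ∈ nodes2check, x ∈ pvUniverse graph ∧ x ∉ checked) : Int :=
  if h0 : nodes2check = [] then -1
  else if node2 ∈ nodes2check then distance + 1
  else
    find_min_path_length_loop graph node2
      (PySem.Set.diff
        (nodes2check.foldl (fun acc a => PySem.Set.union acc ((PySem.Dict.mk graph).getD a [])) PySem.Set.empty)
        (PySem.Set.union checked nodes2check))
      (PySem.Set.union checked nodes2check)
      (distance + 1)
      (by
        intro x hx
        rw [PySem.Set.mem_diff _ _ _] at hx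
        refine ⟨?_, hx.2⟩
        rcases (pvMemUnionFold graph nodes2check PySem.Set.empty x).mp hx.1 with h | ⟨a, _, ha⟩
        · simp [PySem.Set.empty] at h
        · exact pvGetD_subset_universe graph a x ha)
termination_by ((pvUniverse graph).filter (fun x => x ∉ checked)).length
decreasing_by
  obtain ⟨x, hx⟩ : ∃ x, x ∈ nodes2check := by
    cases nodes2check with
    | nil => exact absurd rfl h0
    | cons y ys => exact ⟨y, List.mem_cons_self ..⟩
  refine pvFilterMono _ _ ?_ _ x (hf x hx).1 ?_ ?_
  · intro y hy
    simp only [decide_eq_true_eq] at hy ⊢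
    intro hyc
    exact hy ((PySem.Set.mem_union _ _ _).mpr (Or.inl hyc))
  · simpa using (hf x hx).2
  · simp [(PySem.Set.mem_union _ _ _), hx]

def find_min_path_length (graph : List (String × List String)) (node1 : String) (node2 : String) : Int :=
  match h : (PySem.Dict.mk graph).get? node1 with
  | none => -1
  | some nodes2check =>
      find_min_path_length_loop graph node2 nodes2check PySem.Set.empty 0
        (fun x hx => ⟨pvGet?_subset_universe graph node1 nodes2check h x hx, by simp [PySem.Set.empty]⟩)

-- ===== PORT B =====
-- the inner 'for nb in graph.get(node, ())' loop of B: returns (new visited, freshly enqueued nodes)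
def pvExpandFold (graph : List (String × List String)) (node : String) (visited : List String) :
    List String × List String :=
  ((PySem.Dict.mk graph).getD node []).foldl
    (fun s nb => if nb ∈ s.1 then s else (s.1 ++ [nb], s.2 ++ [nb])) (visited, [])

lemma pvExpandFoldAux (ns : List String) : ∀ (v acc : List String),
    ∃ l, (ns.foldl (fun s nb => if nb ∈ s.1 then s else (s.1 ++ [nb], s.2 ++ [nb])) (v, acc)).1 = v ++ l
      ∧ (ns.foldl (fun s nb => if nb ∈ s.1 then s else (s.1 ++ [nb], s.2 ++ [nb])) (v, acc)).2 = acc ++ l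
      ∧ (∀ y ∈ l, y ∈ ns ∧ y ∉ v)
      ∧ (∀ y ∈ ns, y ∈ v ++ l) := by
  induction ns with
  | nil => intro v acc; exact ⟨[], by simp⟩
  | cons n ns ih =>
    intro v acc
    by_cases hn : n ∈ v
    · obtain ⟨l, h1, h2, h3, h4⟩ := ih v acc
      refine ⟨l, by simp [List.foldl_cons, hn, h1], by simp [List.foldl_cons, hn, h2], ?_, ?_⟩
      · exact fun y hy => ⟨List.mem_cons_of_mem _ (h3 y hy).1, (h3 y hy).2⟩
      · intro y hy
        rcases List.mem_cons.mp hy with rfl | hy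
        · exact List.mem_append.mpr (Or.inl hn)
        · exact h4 y hy
    · obtain ⟨l, h1, h2, h3, h4⟩ := ih (v ++ [n]) (acc ++ [n])
      refine ⟨n :: l, ?_, ?_, ?_, ?_⟩
      · simpa [List.foldl_cons, hn, List.append_assoc] using h1
      · simpa [List.foldl_cons, hn, List.append_assoc] using h2
      · intro y hy
        rcases List.mem_cons.mp hy with rfl | hy
        · exact ⟨List.mem_cons_self .., hn⟩
        · refine ⟨List.mem_cons_of_mem _ (h3 y hy).1, fun hyv => (h3 y hy).2 (by simp [hyv])⟩
      · intro y hy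
        rcases List.mem_cons.mp hy with rfl | hy
        · simp
        · have := h4 y hy
          simp only [List.mem_append, List.mem_cons] at this ⊢
          tauto

lemma pvExpandFold_spec (graph : List (String × List String)) (node : String) (visited : List String) :
    ∃ l, (pvExpandFold graph node visited).1 = visited ++ l
      ∧ (pvExpandFold graph node visited).2 = l
      ∧ (∀ y ∈ l, y ∈ (PySem.Dict.mk graph).getD node [] ∧ y ∉ visited)
      ∧ (∀ y ∈ (PySem.Dict.mk graph).getD node [], y ∈ visited ++ l) := by
  obtain ⟨l, h1, h2, h3, h4⟩ := pvExpandFoldAux ((PySem.Dict.mk graph).getD node []) visited []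
  exact ⟨l, h1, by simpa using h2, h3, h4⟩

-- literal transliteration of B's queue loop (index scan over a growing list = pop from the front)
def find_min_path_length_alt_loop (graph : List (String × List String)) (node2 : String)
    (queue : List (String × Int)) (visited : List String) : Int :=
  match queue with
  | [] => -1
  | (node, dist) :: rest =>
    if node = node2 then dist
    else
      find_min_path_length_alt_loop graph node2
        (rest ++ (pvExpandFold graph node visited).2.map (fun x => (x, dist + 1)))
        (pvExpandFold graph node visited).1
termination_by ((((pvUniverse graph).filter (fun x => x ∉ visited)).length, queue.length))
decreasing_by
  obtain ⟨l, h1, h2, h3, h4⟩ := pvExpandFold_spec graph node visited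
  cases l with
  | nil =>
    rw [h1, h2]
    simp only [List.append_nil, List.map_nil]
    exact Prod.Lex.right _ (by simp)
  | cons y l' =>
    apply Prod.Lex.left
    refine pvFilterMono _ _ ?_ _ y ?_ ?_ ?_
    · intro z hz
      simp only [decide_eq_true_eq, h1] at hz ⊢
      intro hzv
      exact hz (List.mem_append.mpr (Or.inl hzv))
    · exact pvGetD_subset_universe graph node y (h3 y (List.mem_cons_self ..)).1
    · simpa using (h3 y (List.mem_cons_self ..)).2
    · simp [h1]

def find_min_path_length_alt (graph : List (String × List String)) (node1 : String) (node2 : String) : Int :=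
  match (PySem.Dict.mk graph).get? node1 with
  | none => -1
  | some start =>
      find_min_path_length_alt_loop graph node2
        (start.map (fun n => (n, (1 : Int)))) (PySem.Set.ofList start)

-- ===== PRECONDITION & SPEC =====
def Spec_find_min_path_length (graph : List (String × List String)) (node1 : String) (node2 : String) (out : Int) : Prop := out = find_min_path_length_alt graph node1 node2
instance (graph : List (String × List String)) (node1 : String) (node2 : String) (out : Int) : Decidable (Spec_find_min_path_length graph node1 node2 out) := by unfold Spec_find_min_path_length; infer_instance

-- ===== CLAIM (what is proved, stated in full; the proofs are below) =====
def Claim_equal_find_min_path_length : Prop := ∀ (graph : List (String × List String)) (node1 : String) (node2 : String), Dom_find_min_path_length graph node1 node2 → Spec_find_min_path_length graph node1 node2 (find_min_path_length graph node1 node2)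

-- ===== LEMMAS AND PROOFS =====

-- B's whole-level expansion: fold pvExpandFold over one BFS level
def pvCollect (graph : List (String × List String)) (xs : List String) (v : List String) :
    List String × List String :=
  match xs with
  | [] => (v, [])
  | x :: rest =>
      ((pvCollect graph rest (pvExpandFold graph x v).1).1,
       (pvExpandFold graph x v).2 ++ (pvCollect graph rest (pvExpandFold graph x v).1).2)

lemma pvExpandFold_mem (graph : List (String × List String)) (node : String) (visited : List String) :
    (∀ x, x ∈ (pvExpandFold graph node visited).1 ↔ x ∈ visited ∨ x ∈ (PySem.Dict.mk graph).getD node [])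
    ∧ (∀ x, x ∈ (pvExpandFold graph node visited).2 ↔ x ∈ (PySem.Dict.mk graph).getD node [] ∧ x ∉ visited) := by
  obtain ⟨l, h1, h2, h3, h4⟩ := pvExpandFold_spec graph node visited
  constructor
  · intro x
    rw [h1, List.mem_append]
    constructor
    · rintro (h | h)
      · exact Or.inl h
      · exact Or.inr (h3 x h).1
    · rintro (h | h)
      · exact Or.inl h
      · simpa [List.mem_append] using h4 x h
  · intro x
    rw [h2]
    constructor
    · intro h
      exact (h3 x h)
    · rintro ⟨hx, hxv⟩
      rcases List.mem_append.mp (h4 x hx) with h | h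
      · exact absurd h hxv
      · exact h

lemma pvCollect_mem (graph : List (String × List String)) : ∀ (xs v : List String),
    (∀ x, x ∈ (pvCollect graph xs v).1 ↔ x ∈ v ∨ ∃ a ∈ xs, x ∈ (PySem.Dict.mk graph).getD a [])
    ∧ (∀ x, x ∈ (pvCollect graph xs v).2 ↔ (∃ a ∈ xs, x ∈ (PySem.Dict.mk graph).getD a []) ∧ x ∉ v) := by
  intro xs
  induction xs with
  | nil => intro v; simp [pvCollect]
  | cons a xs ih =>
    intro v
    obtain ⟨e1, e2⟩ := pvExpandFold_mem graph a v
    obtain ⟨c1, c2⟩ := ih (pvExpandFold graph a v).1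
    constructor
    · intro x
      rw [pvCollect]
      simp only [c1, e1, List.mem_cons]
      constructor
      · rintro ((h | h) | ⟨b, hb, hx⟩)
        · exact Or.inl h
        · exact Or.inr ⟨a, Or.inl rfl, h⟩
        · exact Or.inr ⟨b, Or.inr hb, hx⟩
      · rintro (h | ⟨b, (rfl | hb), hx⟩)
        · exact Or.inl (Or.inl h)
        · exact Or.inl (Or.inr hx)
        · exact Or.inr ⟨b, hb, hx⟩
    · intro x
      rw [pvCollect]
      simp only [List.mem_append, c2, e2, e1, List.mem_cons]
      constructor
      · rintro (⟨hx, hxv⟩ | ⟨⟨b, hb, hx⟩, hnv⟩)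
        · exact ⟨⟨a, Or.inl rfl, hx⟩, hxv⟩
        · exact ⟨⟨b, Or.inr hb, hx⟩, fun hv => hnv (Or.inl hv)⟩
      · rintro ⟨⟨b, (rfl | hb), hx⟩, hxv⟩
        · exact Or.inl ⟨hx, hxv⟩
        · by_cases hxa : x ∈ (PySem.Dict.mk graph).getD a []
          · exact Or.inl ⟨hxa, hxv⟩
          · exact Or.inr ⟨⟨b, hb, hx⟩, fun h => h.elim hxv hxa⟩

lemma pvInner (graph : List (String × List String)) (node2 : String) : ∀ (xs ys v : List String) (k : Int),
    find_min_path_length_alt_loop graph node2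
        (xs.map (fun x => (x, k)) ++ ys.map (fun x => (x, k + 1))) v
      = if node2 ∈ xs then k
        else find_min_path_length_alt_loop graph node2
          ((ys ++ (pvCollect graph xs v).2).map (fun x => (x, k + 1))) (pvCollect graph xs v).1 := by
  intro xs
  induction xs with
  | nil => intro ys v k; simp [pvCollect]
  | cons x xs ih =>
    intro ys v k
    by_cases hx : x = node2
    · subst hx
      rw [List.map_cons, List.cons_append, find_min_path_length_alt_loop]
      simp
    · rw [List.map_cons, List.cons_append, find_min_path_length_alt_loop]
      simp only [hx, if_false]
      rw [List.append_assoc, ← List.map_append, ih]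
      by_cases hm : node2 ∈ xs
      · rw [if_pos hm, if_pos (List.mem_cons_of_mem _ hm)]
      · have hnx : node2 ∉ x :: xs := by
          rintro h
          rcases List.mem_cons.mp h with h | h
          · exact hx h.symm
          · exact hm h
        rw [if_neg hm, if_neg hnx, pvCollect]
        rw [← List.append_assoc]

lemma pvMain (graph : List (String × List String)) (node2 : String) :
    ∀ (n : Nat) (f₁ c : List String) (hf : ∀ x ∈ f₁, x ∈ pvUniverse graph ∧ x ∉ c)
      (f₂ v : List String) (d : Int),
      (((pvUniverse graph).filter (fun x => x ∉ c)).length = n) →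
      (∀ x, x ∈ f₁ ↔ x ∈ f₂) →
      (∀ x, x ∈ v ↔ x ∈ c ∨ x ∈ f₁) →
      find_min_path_length_loop graph node2 f₁ c d hf
        = find_min_path_length_alt_loop graph node2 (f₂.map (fun x => (x, d + 1))) v := by
  intro n
  induction n using Nat.strong_induction_on with
  | _ n IH =>
    intro f₁ c hf f₂ v d hn h12 hv
    rw [find_min_path_length_loop]
    by_cases h0 : f₁ = []
    · have hf2 : f₂ = [] := by
        rw [List.eq_nil_iff_forall_not_mem]
        intro x hx
        have := (h12 x).mpr hx
        rw [h0] at this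
        simp at this
      rw [dif_pos h0, hf2]
      simp [find_min_path_length_alt_loop]
    · rw [dif_neg h0]
      have hinner := pvInner graph node2 f₂ [] v (d + 1)
      simp only [List.map_nil, List.append_nil, List.nil_append] at hinner
      rw [hinner]
      obtain ⟨C1mem, C2mem⟩ := pvCollect_mem graph f₂ v
      by_cases hm : node2 ∈ f₁
      · rw [if_pos hm, if_pos ((h12 node2).mp hm)]
      · rw [if_neg hm, if_neg (fun h => hm ((h12 node2).mpr h))]
        obtain ⟨x0, hx0⟩ : ∃ x, x ∈ f₁ := by
          cases f₁ with
          | nil => exact absurd rfl h0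
          | cons y ys => exact ⟨y, List.mem_cons_self ..⟩
        refine IH (((pvUniverse graph).filter (fun x => x ∉ PySem.Set.union c f₁)).length) ?_ _ _ _
          ((pvCollect graph f₂ v).2) ((pvCollect graph f₂ v).1) (d + 1) rfl ?_ ?_
        · subst hn
          refine pvFilterMono _ _ ?_ _ x0 (hf x0 hx0).1 ?_ ?_
          · intro y hy
            simp only [decide_eq_true_eq] at hy ⊢
            intro hyc
            exact hy ((PySem.Set.mem_union _ _ _).mpr (Or.inl hyc))
          · simpa using (hf x0 hx0).2
          · simp [(PySem.Set.mem_union _ _ _), hx0]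
        · intro x
          rw [PySem.Set.mem_diff _ _ _, pvMemUnionFold, C2mem]
          simp only [PySem.Set.mem_union _ _ _, PySem.Set.empty, List.not_mem_nil, false_or, hv]
          constructor
          · rintro ⟨⟨a, ha, hxa⟩, hnu⟩
            exact ⟨⟨a, (h12 a).mp ha, hxa⟩, fun h => hnu h⟩
          · rintro ⟨⟨a, ha, hxa⟩, hnv⟩
            exact ⟨⟨a, (h12 a).mpr ha, hxa⟩, hnv⟩
        · intro x
          rw [C1mem, PySem.Set.mem_diff _ _ _, pvMemUnionFold]
          simp only [PySem.Set.mem_union _ _ _, PySem.Set.empty, List.not_mem_nil, false_or, hv]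
          constructor
          · rintro (h | ⟨a, ha, hxa⟩)
            · exact Or.inl h
            · by_cases hcv : x ∈ c ∨ x ∈ f₁
              · exact Or.inl hcv
              · exact Or.inr ⟨⟨a, (h12 a).mpr ha, hxa⟩, hcv⟩
          · rintro (h | ⟨⟨a, ha, hxa⟩, _⟩)
            · exact Or.inl h
            · exact Or.inr ⟨a, (h12 a).mp ha, hxa⟩

-- ===== VERDICT (by name: the statement is the Claim_ definition above) =====
theorem find_min_path_length_spec : Claim_equal_find_min_path_length := by
  intro graph node1 node2 _
  unfold Spec_find_min_path_length find_min_path_length find_min_path_length_alt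
  split
  case _ h =>
    simp only [h]
  case _ start h =>
    simp only [h]
    have := pvMain graph node2 (((pvUniverse graph).filter (fun x => x ∉ PySem.Set.empty)).length)
      start PySem.Set.empty
      (fun x hx => ⟨pvGet?_subset_universe graph node1 start h x hx, by simp [PySem.Set.empty]⟩)
      start (PySem.Set.ofList start) 0 rfl (fun x => Iff.rfl)
      (by intro x; simp [PySem.Set.mem_ofList, PySem.Set.empty])
    simpa using this
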